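-- pv_equiv track=rewrite | github.com/MotiTheWizerd/GenesisLoopCenterelKnowledge | modules/self_learning/memory_archaeologist.py | _find_shared_themes
-- ===== SOURCE A (Python) =====
-- from typing import Dict, List, Optional, Any, Tuple
--
-- def _find_shared_themes(content1: str, content2: str) -> List[str]:
--     """Find shared themes between two content pieces"""
--     # Simple keyword-based theme detection
--     theme_keywords = {
--         'consciousness': ['conscious', 'awareness', 'awake'],
--         'existence': ['exist', 'being', 'reality'],
--         'learning': ['learn', 'understand', 'knowledge'],
--         'growth': ['grow', 'evolve', 'develop'],
--         'identity': ['identity', 'self', 'who am i'],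
--         'purpose': ['purpose', 'meaning', 'why'],
--         'emotion': ['feel', 'emotion', 'experience'],
--         'time': ['time', 'moment', 'now'],
--         'connection': ['connect', 'relate', 'bond']
--     }
--
--     shared_themes = []
--     content1_lower = content1.lower()
--     content2_lower = content2.lower()
--
--     for theme, keywords in theme_keywords.items():
--         if (any(keyword in content1_lower for keyword in keywords) and
--             any(keyword in content2_lower for keyword in keywords)):
--             shared_themes.append(theme)
--
--     return shared_themes
-- ===== SOURCE B (Python) =====
-- def _find_shared_themes(content1: str, content2: str):
--     """Find shared themes between two content pieces.
--
--     Text-driven multi-pattern scan instead of one substring search per keyword: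
--     an index maps each keyword's first character to its (theme, keyword) pairs;
--     one pass over each lowercased content's positions looks up the character at
--     that position and records the themes whose keyword begins there.  A theme is
--     shared when both scans recorded it.  Correct because 'kw in t' holds iff
--     t.startswith(kw, i) for some position i (keywords are non-empty).
--     """
--     theme_keywords = {
--         'consciousness': ['conscious', 'awareness', 'awake'],
--         'existence': ['exist', 'being', 'reality'],
--         'learning': ['learn', 'understand', 'knowledge'],
--         'growth': ['grow', 'evolve', 'develop'],
--         'identity': ['identity', 'self', 'who am i'],
--         'purpose': ['purpose', 'meaning', 'why'],
--         'emotion': ['feel', 'emotion', 'experience'],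
--         'time': ['time', 'moment', 'now'],
--         'connection': ['connect', 'relate', 'bond']
--     }
--
--     by_first = {}
--     for theme, keywords in theme_keywords.items():
--         for kw in keywords:
--             by_first.setdefault(kw[0], []).append((theme, kw))
--
--     def themes_in(text):
--         t = text.lower()
--         found = set()
--         for i, ch in enumerate(t):
--             for theme, kw in by_first.get(ch, ()):
--                 if theme not in found and t.startswith(kw, i):
--                     found.add(theme)
--         return found
--
--     found1 = themes_in(content1)
--     found2 = themes_in(content2)
--     return [theme for theme in theme_keywords if theme in found1 and theme in found2]
-- ===== Notes on version B (the rewrite author's own statement) =====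
-- stated objective: alternative
-- what changed: A runs a separate substring search ('kw in content') for every keyword of every theme; B builds a first-character index of (theme, keyword) pairs and makes one text-driven pass over each content's positions, looking up the character there and recording the themes whose keyword begins at that position.
import Mathlib
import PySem

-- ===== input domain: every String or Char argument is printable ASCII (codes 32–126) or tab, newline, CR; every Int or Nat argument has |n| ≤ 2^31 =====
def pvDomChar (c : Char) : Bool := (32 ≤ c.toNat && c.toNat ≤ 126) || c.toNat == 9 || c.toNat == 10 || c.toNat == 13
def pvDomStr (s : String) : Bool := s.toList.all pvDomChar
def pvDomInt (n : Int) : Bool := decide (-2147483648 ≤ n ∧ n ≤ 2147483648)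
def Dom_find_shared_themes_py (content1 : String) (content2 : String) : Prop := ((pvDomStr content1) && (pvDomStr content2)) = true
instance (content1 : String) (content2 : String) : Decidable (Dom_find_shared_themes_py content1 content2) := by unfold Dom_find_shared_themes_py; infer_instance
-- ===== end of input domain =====

-- B replaces A's per-keyword substring searches by a text-driven scan: a first-character
-- index maps each position's character to candidate (theme, keyword) pairs, and one pass
-- over each content records the themes whose keyword begins there (alternative traversal).


-- the literal keyword table both Python versions carry
def pvThemeKeywords : List (String × List String) :=
  [("consciousness", ["conscious", "awareness", "awake"]),
   ("existence", ["exist", "being", "reality"]),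
   ("learning", ["learn", "understand", "knowledge"]),
   ("growth", ["grow", "evolve", "develop"]),
   ("identity", ["identity", "self", "who am i"]),
   ("purpose", ["purpose", "meaning", "why"]),
   ("emotion", ["feel", "emotion", "experience"]),
   ("time", ["time", "moment", "now"]),
   ("connection", ["connect", "relate", "bond"])]

-- ===== PORT A =====
def find_shared_themes_py (content1 : String) (content2 : String) : List String :=
  let content1_lower := PySem.Str.lower content1
  let content2_lower := PySem.Str.lower content2
  pvThemeKeywords.foldl
    (fun shared_themes p =>
      if (p.2.any fun kw => PySem.Str.isIn kw content1_lower) &&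
         (p.2.any fun kw => PySem.Str.isIn kw content2_lower)
      then shared_themes ++ [p.1] else shared_themes)
    []

-- ===== PORT B =====
-- Source B's by_first index: 'by_first.setdefault(kw[0], []).append((theme, kw))' is
-- Dict.modify with default []; kw[0] is ported as the head character of kw (exact:
-- every keyword literal is non-empty, so kw[0] never raises)
def pvByFirst : PySem.Dict Char (List (String × String)) :=
  pvThemeKeywords.foldl
    (fun d q => q.2.foldl
      (fun d kw => PySem.Dict.modify d (kw.toList.headD ' ') [] (fun l => l ++ [(q.1, kw)]))
      d)
    PySem.Dict.empty

-- Source B's themes_in: 'for i, ch in enumerate(t)' scans positions; 't.startswith(kw, i)'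
-- with 0 ≤ i is exactly 'kw.toList <+: t.drop i', ported as Chars.startswith (t.drop i)
def pvThemesIn (text : String) : PySem.Set String :=
  let t := (PySem.Str.lower text).toList
  (PySem.List.enumerate t 0).foldl
    (fun found ic =>
      (PySem.Dict.getD pvByFirst ic.2 []).foldl
        (fun found p =>
          if !(PySem.Set.contains found p.1) &&
             PySem.Chars.startswith (t.drop ic.1.toNat) p.2.toList
          then PySem.Set.add found p.1 else found)
        found)
    PySem.Set.empty

def find_shared_themes_py_alt (content1 : String) (content2 : String) : List String :=
  let found1 := pvThemesIn content1
  let found2 := pvThemesIn content2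
  (pvThemeKeywords.map Prod.fst).filter
    (fun theme => PySem.Set.contains found1 theme && PySem.Set.contains found2 theme)

-- ===== PRECONDITION & SPEC =====
def Spec_find_shared_themes_py (content1 : String) (content2 : String) (out : List String) : Prop := out = find_shared_themes_py_alt content1 content2
instance (content1 : String) (content2 : String) (out : List String) : Decidable (Spec_find_shared_themes_py content1 content2 out) := by unfold Spec_find_shared_themes_py; infer_instance

-- ===== CLAIM (what is proved, stated in full; the proofs are below) =====
def Claim_equal_find_shared_themes_py : Prop := ∀ (content1 : String) (content2 : String), Dom_find_shared_themes_py content1 content2 → Spec_find_shared_themes_py content1 content2 (find_shared_themes_py content1 content2)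

-- ===== LEMMAS AND PROOFS =====

-- all (theme, keyword) pairs of the table, flattened (proof-side view of by_first)
def pvFlat : List (String × String) :=
  pvThemeKeywords.flatMap (fun q => q.2.map (fun kw => (q.1, kw)))

-- inner loop: the resulting set contains th iff it did before or some candidate pair
-- with key th passes the test
theorem pv_inner_mem {β : Type} (l : List (String × β)) (S : PySem.Set String)
    (pred : String × β → Bool) (th : String) :
    th ∈ (l.foldl (fun S p => if !(PySem.Set.contains S p.1) && pred p
                               then PySem.Set.add S p.1 else S) S) ↔
    th ∈ S ∨ ∃ p ∈ l, p.1 = th ∧ pred p = true := by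
  induction l generalizing S with
  | nil => simp
  | cons p l ih =>
    simp only [List.foldl_cons]
    by_cases hc : (!(PySem.Set.contains S p.1) && pred p) = true
    · rw [if_pos hc]
      rw [ih]
      simp only [Bool.and_eq_true, Bool.not_eq_true', PySem.Set.contains_eq_listContains] at hc
      rw [PySem.Set.mem_add]
      constructor
      · rintro (⟨h | h⟩ | h)
        · exact Or.inl h
        · exact Or.inr ⟨p, by simp, h.symm, hc.2⟩
        · obtain ⟨q, hq, hq1, hq2⟩ := h; exact Or.inr ⟨q, by simp [hq], hq1, hq2⟩
      · rintro (h | ⟨q, hq, hq1, hq2⟩)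
        · exact Or.inl (Or.inl h)
        · rcases List.mem_cons.mp hq with h | h
          · subst h; exact Or.inl (Or.inr hq1.symm)
          · exact Or.inr ⟨q, h, hq1, hq2⟩
    · rw [if_neg hc]
      rw [ih]
      simp only [Bool.and_eq_true, Bool.not_eq_true', PySem.Set.contains_eq_listContains,
        not_and] at hc
      constructor
      · rintro (h | ⟨q, hq, hq1, hq2⟩)
        · exact Or.inl h
        · exact Or.inr ⟨q, by simp [hq], hq1, hq2⟩
      · rintro (h | ⟨q, hq, hq1, hq2⟩)
        · exact Or.inl h
        · rcases List.mem_cons.mp hq with h | h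
          · subst h
            have : q.1 ∈ S := by
              by_cases hp : List.contains S q.1 = true
              · exact List.contains_iff_mem.mp hp
              · exact absurd (hc (by simpa using hp)) (by simp [hq2])
            exact Or.inl (hq1 ▸ this)
          · exact Or.inr ⟨q, h, hq1, hq2⟩

-- outer loop: fold over any index list L, candidate list M a per index
theorem pv_outer_mem {α β : Type} (L : List α) (M : α → List (String × β))
    (S : PySem.Set String) (pred : α → String × β → Bool) (th : String) :
    th ∈ (L.foldl (fun S a =>
            (M a).foldl (fun S p => if !(PySem.Set.contains S p.1) && pred a p
                                   then PySem.Set.add S p.1 else S) S) S) ↔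
    th ∈ S ∨ ∃ a ∈ L, ∃ p ∈ M a, p.1 = th ∧ pred a p = true := by
  induction L generalizing S with
  | nil => simp
  | cons a L ih =>
    simp only [List.foldl_cons]
    rw [ih, pv_inner_mem]
    constructor
    · rintro (⟨h | h⟩ | h)
      · exact Or.inl h
      · exact Or.inr ⟨a, by simp, h⟩
      · obtain ⟨j, hj, hrest⟩ := h; exact Or.inr ⟨j, by simp [hj], hrest⟩
    · rintro (h | ⟨j, hj, hrest⟩)
      · exact Or.inl (Or.inl h)
      · rcases List.mem_cons.mp hj with h | h
        · subst h; exact Or.inl (Or.inr hrest)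
        · exact Or.inr ⟨j, h, hrest⟩

-- a nonempty pattern is a substring of t iff it begins at some scanned position
theorem pv_scan_iff_isIn (t : List Char) (kw : List Char) (hkw : kw ≠ []) :
    (∃ i ∈ PySem.List.pyRange 0 t.length 1, PySem.Chars.startswith (t.drop i.toNat) kw = true) ↔
    PySem.Chars.isIn kw t = true := by
  rw [← PySem.Chars.exists_prefix_drop_iff_isIn]
  constructor
  · rintro ⟨i, _, h⟩
    exact ⟨i.toNat, (PySem.Chars.startswith_iff _ _).mp h⟩
  · rintro ⟨j, h⟩
    have hlen : kw.length ≤ (t.drop j).length := h.length_le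
    have hj : j < t.length := by
      rw [List.length_drop] at hlen
      have : 1 ≤ kw.length := by
        cases kw with | nil => exact absurd rfl hkw | cons _ _ => simp
      omega
    refine ⟨(j : Int), ?_, ?_⟩
    · rw [PySem.List.mem_pyRange_one]; constructor <;> [positivity; exact_mod_cast hj]
    · rw [PySem.Chars.startswith_iff]; simpa using h

-- every keyword in the table is nonempty
theorem pv_kw_ne_nil : ∀ p ∈ pvThemeKeywords, ∀ kw ∈ p.2, kw.toList ≠ [] := by decide

theorem pv_keys_nodup : (pvThemeKeywords.map Prod.fst).Nodup := by decide

-- anything stored in the by_first index is a flattened table pair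
theorem pv_byFirst_sound : ∀ e ∈ pvByFirst.items, ∀ p ∈ e.2, p ∈ pvFlat := by decide

-- every flattened pair is found in the index under its keyword's first character
set_option maxRecDepth 20000 in
theorem pv_byFirst_complete :
    ∀ p ∈ pvFlat, p ∈ PySem.Dict.getD pvByFirst (p.2.toList.headD ' ') [] := by decide

theorem pv_flat_mem : ∀ p ∈ pvFlat, ∃ q ∈ pvThemeKeywords, q.1 = p.1 ∧ p.2 ∈ q.2 := by decide

theorem pv_mem_flat : ∀ q ∈ pvThemeKeywords, ∀ kw ∈ q.2, (q.1, kw) ∈ pvFlat := by decide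

-- a getD hit comes from some entry of the dict
theorem pv_getD_mem {κ τ : Type} [BEq κ] (d : PySem.Dict κ (List τ)) (c : κ) (x : τ)
    (hx : x ∈ PySem.Dict.getD d c []) : ∃ e ∈ d.items, x ∈ e.2 := by
  rw [PySem.Dict.getD_eq_get?_getD] at hx
  cases h : PySem.Dict.get? d c with
  | none => rw [h] at hx; simp at hx
  | some v =>
    rw [h] at hx
    simp only [Option.getD_some] at hx
    unfold PySem.Dict.get? at h
    obtain ⟨e, he, hev⟩ := Option.map_eq_some_iff.mp h
    exact ⟨e, List.mem_of_find?_eq_some he, hev ▸ hx⟩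

-- membership in B's scanned set equals A's any-keyword substring test, per table entry
theorem pv_themesIn_contains (text : String) (p : String × List String)
    (hp : p ∈ pvThemeKeywords) :
    PySem.Set.contains (pvThemesIn text) p.1 =
    (p.2.any fun kw => PySem.Str.isIn kw (PySem.Str.lower text)) := by
  rw [Bool.eq_iff_iff, PySem.Set.contains_eq_listContains, List.contains_iff_mem]
  unfold pvThemesIn
  dsimp only
  rw [PySem.List.enumerate_eq_map_pyRange _ ' ', List.foldl_map, PySem.List.len_eq]
  rw [pv_outer_mem (β := String)
      (L := PySem.List.pyRange 0 (((PySem.Str.lower text).toList.length : Int)))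
      (M := fun j => PySem.Dict.getD pvByFirst (PySem.List.pyGetD (PySem.Str.lower text).toList j ' ') [])
      (pred := fun j q => PySem.Chars.startswith ((PySem.Str.lower text).toList.drop j.toNat) q.2.toList)]
  set t := (PySem.Str.lower text).toList with ht
  simp only [PySem.Set.empty, List.not_mem_nil, false_or, List.any_eq_true]
  constructor
  · rintro ⟨j, hj, q, hq, hq1, hq2⟩
    obtain ⟨e, he, heq⟩ := pv_getD_mem _ _ _ hq
    obtain ⟨r, hr, hr1, hr2⟩ := pv_flat_mem q (pv_byFirst_sound e he q heq)
    have hrp : r = p := List.inj_on_of_nodup_map pv_keys_nodup hr hp (hr1.trans hq1)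
    refine ⟨q.2, hrp ▸ hr2, ?_⟩
    rw [PySem.Str.isIn_eq, ← ht]
    exact (pv_scan_iff_isIn _ _ (pv_kw_ne_nil r hr q.2 hr2)).mp ⟨j, hj, hq2⟩
  · rintro ⟨kw, hkw, hin⟩
    rw [PySem.Str.isIn_eq, ← ht] at hin
    obtain ⟨j, hj, hsw⟩ := (pv_scan_iff_isIn _ _ (pv_kw_ne_nil p hp kw hkw)).mpr hin
    refine ⟨j, hj, (p.1, kw), ?_, rfl, hsw⟩
    -- the pair is indexed under kw's first character, which is the character at position j
    have hflat : (p.1, kw) ∈ pvFlat := pv_mem_flat p hp kw hkw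
    have hcomp := pv_byFirst_complete _ hflat
    obtain ⟨c, ks, hck⟩ := List.exists_cons_of_ne_nil (pv_kw_ne_nil p hp kw hkw)
    -- startswith gives t.drop j = kw.toList ++ s, so the character at j is c
    obtain ⟨s, hs⟩ := (PySem.Chars.startswith_iff _ _).mp hsw
    have hjr := PySem.List.mem_pyRange_one.mp hj
    have hj2 : j < (t.length : Int) := hjr.2
    have hlt : j.toNat < t.length := by omega
    have h0 : t[j.toNat]? = some c := by
      rw [← List.head?_drop, ← hs, hck]; simp
    have hchar : PySem.List.pyGetD t j ' ' = c := by
      rw [PySem.List.pyGetD_eq_getElem t ' ' hjr.1 hj2]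
      have := List.getElem?_eq_getElem (l := t) (i := j.toNat) hlt
      rw [this] at h0
      exact Option.some_injective _ h0
    rw [hchar]
    simpa [hck] using hcomp

-- ===== VERDICT (by name: the statement is the Claim_ definition above) =====
theorem find_shared_themes_py_spec : Claim_equal_find_shared_themes_py := by
  unfold Claim_equal_find_shared_themes_py Spec_find_shared_themes_py
  intro c1 c2 _
  unfold find_shared_themes_py find_shared_themes_py_alt
  dsimp only
  rw [PySem.List.foldl_append_if, List.nil_append, List.filter_map]
  apply congrArg (List.map Prod.fst)
  apply List.filter_congr
  intro p hp
  simp only [Function.comp_apply]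
  rw [pv_themesIn_contains c1 p hp, pv_themesIn_contains c2 p hp]
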